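-- pv_equiv track=rewrite | github.com/Iluvatar/unix74 | usr/sh.py | makePs1
-- ===== SOURCE A (Python) =====
-- def makePs1(formatString: str) -> str:
--     def escape(c: str):
--         if c == "\\" or c == "$":
--             return c
--         elif c == "u":
--             return "liz"
--         elif c == "h":
--             return "pokey"
--         elif c == "W":
--             return "/"
--         else:
--             return c
--
--     formattedString = ""
--     i = 0
--     while i < len(formatString):
--         char = formatString[i]
--         if char == "\\":
--             if i < len(formatString) - 1:
--                 formattedString += escape(formatString[i + 1])
--             else:
--                 formattedString += "\\"
--             i += 1
--         else:
--             formattedString += char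
--         i += 1
--
--     return formattedString
-- ===== SOURCE B (Python) =====
-- def makePs1(formatString: str) -> str:
--     table = {"u": "liz", "h": "pokey", "W": "/"}
--     parts = []
--     s = formatString
--     while True:
--         j = s.find("\\")
--         if j == -1 or j == len(s) - 1:
--             parts.append(s)
--             return "".join(parts)
--         c = s[j + 1]
--         parts.append(s[:j])
--         parts.append(table.get(c, c))
--         s = s[j + 2:]
-- ===== Notes on version B (the rewrite author's own statement) =====
-- stated objective: faster
-- what changed: Replaces A's character-by-character index loop (advance by 1 or 2, per-char string concatenation) with a chunking loop: str.find jumps straight to the next backslash, the whole backslash-free chunk before it is copied by one slice, the escape character is translated through a dict, and the collected pieces are joined once at the end.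
import Mathlib
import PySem

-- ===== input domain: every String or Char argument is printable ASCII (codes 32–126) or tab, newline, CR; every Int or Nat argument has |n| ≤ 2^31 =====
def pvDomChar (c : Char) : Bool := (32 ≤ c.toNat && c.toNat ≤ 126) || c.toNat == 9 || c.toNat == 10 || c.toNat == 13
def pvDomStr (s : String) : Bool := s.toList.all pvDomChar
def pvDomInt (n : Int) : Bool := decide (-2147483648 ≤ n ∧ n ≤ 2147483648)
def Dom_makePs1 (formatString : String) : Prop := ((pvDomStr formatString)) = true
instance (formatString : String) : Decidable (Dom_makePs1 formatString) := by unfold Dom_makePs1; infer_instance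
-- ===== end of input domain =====

-- B replaces A's character-by-character index loop by a chunking loop: str.find jumps to
-- the next backslash, the whole verbatim chunk before it is copied by one slice, the escape
-- is translated through a dict, and the pieces are joined once; objective: faster
-- (a timing run measured B faster at every generated size).

-- ===== PORT A =====
-- A's inner escape helper (takes the one-character string as a Char)
def makePs1_escape (c : Char) : String :=
  if c = '\\' ∨ c = '$' then String.ofList [c]
  else if c = 'u' then "liz"
  else if c = 'h' then "pokey"
  else if c = 'W' then "/"
  else String.ofList [c]

-- A's while loop: i steps by 2 after a backslash, by 1 otherwise
def makePs1_go (cs : List Char) (i : Nat) (acc : String) : String :=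
  if h : i < cs.length then
    let char := cs[i]
    if char = '\\' then
      if h2 : i < cs.length - 1 then
        makePs1_go cs (i + 2) (acc ++ makePs1_escape (cs[i + 1]'(by omega)))
      else
        makePs1_go cs (i + 2) (acc ++ "\\")
    else
      makePs1_go cs (i + 1) (acc ++ String.ofList [char])
  else acc
termination_by cs.length - i

def makePs1 (formatString : String) : String :=
  makePs1_go formatString.toList 0 ""

-- ===== PORT B =====
-- B's translation table
def makePs1_table : PySem.Dict Char String :=
  PySem.Dict.ofList [('u', "liz"), ('h', "pokey"), ('W', "/")]

-- B's while loop: s.find("\\") locates the next backslash, slices copy the verbatim chunk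
-- and drop the handled escape pair. (s[j+1] is ported as pyGetD: the branch guarantees the
-- index is in range, so the default is never read and the port is exact.)
def makePs1_alt_go (s : List Char) (parts : List String) : String :=
  let j := PySem.Chars.find s ['\\']
  if hstop : j = -1 ∨ j = (s.length : Int) - 1 then
    PySem.Str.join "" (parts ++ [String.ofList s])
  else
    let c := PySem.List.pyGetD s (j + 1) ' '
    makePs1_alt_go (PySem.List.slice s (some (j + 2)) none)
      (parts ++ [String.ofList (PySem.List.slice s none (some j)),
                 PySem.Dict.getD makePs1_table c (String.ofList [c])])
termination_by s.length
decreasing_by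
  have h := PySem.Chars.findFrom_natCast_spec s ['\\'] 0 (Nat.zero_le _)
    (by simpa using (fun he => hstop (Or.inl he)))
  simp only [Nat.cast_zero, PySem.Chars.findFrom_zero] at h
  obtain ⟨h0, hpre, -⟩ := h
  have hlen : (PySem.Chars.find s ['\\']).toNat < s.length := by
    rcases hpre with ⟨t, ht⟩
    have := congrArg List.length ht
    simp at this; omega
  rw [PySem.List.slice_from s (by omega)]
  simp only [List.length_drop]
  omega

def makePs1_alt (formatString : String) : String :=
  makePs1_alt_go formatString.toList []

-- ===== PRECONDITION & SPEC =====
def Spec_makePs1 (formatString : String) (out : String) : Prop := out = makePs1_alt formatString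
instance (formatString : String) (out : String) : Decidable (Spec_makePs1 formatString out) := by unfold Spec_makePs1; infer_instance

-- ===== CLAIM (what is proved, stated in full; the proofs are below) =====
def Claim_equal_makePs1 : Prop := ∀ (formatString : String), Dom_makePs1 formatString → Spec_makePs1 formatString (makePs1 formatString)

-- ===== LEMMAS AND PROOFS =====

-- reference characterisation of the expansion, as a list-of-chars recursion
def specF : List Char → List Char
  | [] => []
  | c :: rest =>
    if c = '\\' then
      match rest with
      | [] => ['\\']
      | d :: r => (makePs1_escape d).toList ++ specF r
    else c :: specF rest

-- unfolding equations of specF (the equation compiler's match hides them from rw)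
theorem specF_cons {c : Char} (X : List Char) (hc : c ≠ '\\') :
    specF (c :: X) = c :: specF X := by
  rw [specF.eq_def]; simp [hc]

theorem specF_bs (d : Char) (r : List Char) :
    specF ('\\' :: d :: r) = (makePs1_escape d).toList ++ specF r := by
  rw [specF.eq_def]; simp

-- B's dict lookup with the char itself as default computes A's escape helper
theorem getD_table_eq_escape (n : Char) :
    PySem.Dict.getD makePs1_table n (String.ofList [n]) = makePs1_escape n := by
  by_cases h1 : n = 'u'
  · subst h1; rfl
  by_cases h2 : n = 'h'
  · subst h2; rfl
  by_cases h3 : n = 'W'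
  · subst h3; rfl
  have e1 : ('u' == n) = false := by simp; exact fun e => h1 e.symm
  have e2 : ('h' == n) = false := by simp; exact fun e => h2 e.symm
  have e3 : ('W' == n) = false := by simp; exact fun e => h3 e.symm
  simp [makePs1_table, makePs1_escape, PySem.Dict.getD, PySem.Dict.get?, PySem.Dict.ofList,
        PySem.Dict.update, PySem.Dict.empty, PySem.Dict.insert, PySem.Dict.contains,
        List.find?, e1, e2, e3, h1, h2, h3]

theorem join_empty_flatten (l : List String) :
    (PySem.Str.join "" l).toList = (l.map String.toList).flatten := by
  rw [PySem.Str.toList_join]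
  show PySem.Chars.join [] _ = _
  unfold PySem.Chars.join List.intercalate
  induction l.map String.toList with
  | nil => rfl
  | cons a t ih =>
    cases t with
    | nil => simp
    | cons b t' => simpa using ih

-- A's loop invariant: from index i it produces acc followed by specF of the tail
theorem go_eq (cs : List Char) : ∀ i acc, (makePs1_go cs i acc).toList
    = acc.toList ++ specF (cs.drop i) := by
  intro i
  induction hn : cs.length - i using Nat.strong_induction_on generalizing i with
  | _ n ih =>
    intro acc
    by_cases h : i < cs.length
    · rw [List.drop_eq_getElem_cons h]
      rw [makePs1_go]
      simp only [dif_pos h]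
      by_cases hc : cs[i] = '\\'
      · simp only [if_pos hc]
        by_cases h2 : i < cs.length - 1
        · have hnext : i + 1 < cs.length := by omega
          rw [dif_pos h2]
          rw [ih (cs.length - (i + 2)) (by omega) (i + 2) rfl]
          rw [List.drop_eq_getElem_cons hnext]
          simp [hc, specF]
        · rw [dif_neg h2]
          rw [ih (cs.length - (i + 2)) (by omega) (i + 2) rfl]
          have hdrop : cs.drop (i + 1) = [] := by
            apply List.drop_eq_nil_of_le; omega
          have hdrop2 : cs.drop (i + 2) = [] := by
            apply List.drop_eq_nil_of_le; omega
          simp [hc, hdrop, hdrop2, specF]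
      · simp only [if_neg hc]
        rw [ih (cs.length - (i + 1)) (by omega) (i + 1) rfl]
        rw [specF_cons _ hc]
        simp
    · rw [makePs1_go]
      simp only [dif_neg h]
      have : cs.drop i = [] := by apply List.drop_eq_nil_of_le; omega
      simp [this, specF]

-- specF passes a backslash-free prefix through verbatim
theorem specF_append (pre : List Char) (hpre : '\\' ∉ pre) :
    ∀ rest, specF (pre ++ rest) = pre ++ specF rest := by
  induction pre with
  | nil => intro rest; rfl
  | cons c p ih =>
    intro rest
    have hc : c ≠ '\\' := fun e => hpre (by simp [e])
    rw [List.cons_append, specF_cons _ hc,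
        ih (fun hm => hpre (List.mem_cons_of_mem _ hm)), List.cons_append]

-- what a successful find of "\\" tells us about s
theorem find_bs_spec (s : List Char) (h : PySem.Chars.find s ['\\'] ≠ -1) :
    0 ≤ PySem.Chars.find s ['\\'] ∧
    (PySem.Chars.find s ['\\']).toNat < s.length ∧
    s.drop (PySem.Chars.find s ['\\']).toNat
      = '\\' :: s.drop ((PySem.Chars.find s ['\\']).toNat + 1) ∧
    '\\' ∉ s.take (PySem.Chars.find s ['\\']).toNat := by
  have hspec := PySem.Chars.findFrom_natCast_spec s ['\\'] 0 (Nat.zero_le _) (by simpa using h)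
  simp only [Nat.cast_zero, PySem.Chars.findFrom_zero] at hspec
  obtain ⟨h0, hpre, hmin⟩ := hspec
  set j := (PySem.Chars.find s ['\\']).toNat with hj
  obtain ⟨t, ht⟩ := hpre
  have hlen : j < s.length := by
    have := congrArg List.length ht
    simp at this; omega
  refine ⟨h0, hlen, ?_, ?_⟩
  · have ht1 : s.drop (j + 1) = t := by
      have : (s.drop j).drop 1 = t := by rw [← ht]; simp
      simpa [List.drop_drop, Nat.add_comm] using this
    rw [← ht, ht1]; rfl
  · intro hm
    obtain ⟨i, hi, hgi⟩ := List.getElem_of_mem hm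
    have hilen : i < s.length := by simp at hi; omega
    have hij : i < j := by simp at hi; omega
    refine hmin i (Nat.zero_le _) hij ⟨s.drop (i + 1), ?_⟩
    rw [List.drop_eq_getElem_cons hilen]
    have : s[i] = '\\' := by
      rw [← hgi]; exact (List.getElem_take).symm
    simp [this]

-- B's loop invariant: it produces the joined parts followed by specF of the remainder
theorem alt_go_eq : ∀ s parts, (makePs1_alt_go s parts).toList
    = (parts.map String.toList).flatten ++ specF s := by
  intro s
  induction hn : s.length using Nat.strong_induction_on generalizing s with
  | _ n ih =>
    intro parts
    rw [makePs1_alt_go]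
    by_cases hstop : PySem.Chars.find s ['\\'] = -1 ∨
        PySem.Chars.find s ['\\'] = (s.length : Int) - 1
    · simp only [dif_pos hstop]
      rw [join_empty_flatten]
      have hs : specF s = s := by
        rcases hstop with hneg | hlast
        · have : ¬ ['\\'] <:+: s := (PySem.Chars.find_eq_neg_one_iff s ['\\']).mp hneg
          have hnb : '\\' ∉ s := fun hm => this ((List.singleton_infix_iff '\\' s).mpr hm)
          have := specF_append s hnb []
          simpa [specF] using this
        · by_cases hnil : s = []
          · subst hnil; rfl
          · have hpos : 0 < s.length := List.length_pos_iff.mpr hnil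
            have hne : PySem.Chars.find s ['\\'] ≠ -1 := by rw [hlast]; intro h; omega
            obtain ⟨h0, hlen, hdropeq, htake⟩ := find_bs_spec s hne
            have hdrop1 : s.drop ((PySem.Chars.find s ['\\']).toNat + 1) = [] := by
              apply List.drop_eq_nil_of_le; omega
            rw [hdrop1] at hdropeq
            obtain ⟨u, htk⟩ : ∃ u, s.take (PySem.Chars.find s ['\\']).toNat = u := ⟨_, rfl⟩
            have hs_eq : s = u ++ ['\\'] := by
              conv_lhs => rw [← List.take_append_drop (PySem.Chars.find s ['\\']).toNat s]
              rw [htk, hdropeq]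
            rw [htk] at htake
            conv_lhs => rw [hs_eq]
            rw [specF_append u htake, hs_eq]
            rfl
      rw [hs]; simp
    · simp only [dif_neg hstop]
      rw [not_or] at hstop
      obtain ⟨hne, hnlast⟩ := hstop
      obtain ⟨h0, hlen, hdropeq, htake⟩ := find_bs_spec s hne
      set j := (PySem.Chars.find s ['\\']).toNat with hj
      have hjval : PySem.Chars.find s ['\\'] = (j : Int) := by
        rw [hj, Int.toNat_of_nonneg h0]
      have hj1 : j + 1 < s.length := by
        have : (j : Int) ≠ (s.length : Int) - 1 := by rw [← hjval]; exact hnlast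
        omega
      -- the remainder after the escape pair
      have hdrop2 : s.drop (j + 1) = s[j + 1] :: s.drop (j + 2) := by
        rw [List.drop_eq_getElem_cons hj1]
      have hslice_from : PySem.List.slice s (some (PySem.Chars.find s ['\\'] + 2)) none
          = s.drop (j + 2) := by
        rw [PySem.List.slice_from s (by omega)]
        congr 1
        omega
      have hslice_to : PySem.List.slice s none (some (PySem.Chars.find s ['\\']))
          = s.take j := by
        rw [PySem.List.slice_to s (by omega), hjval]; simp
      have hget : PySem.List.pyGetD s (PySem.Chars.find s ['\\'] + 1) ' ' = s[j + 1] := by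
        rw [PySem.List.pyGetD_eq_getElem s ' ' (by omega) (by rw [hjval]; omega)]
        congr 1; rw [hjval]; omega
      rw [hslice_from, hslice_to, hget, getD_table_eq_escape]
      rw [ih (s.drop (j + 2)).length (by simp only [List.length_drop]; omega) _ rfl]
      conv_rhs => rw [← List.take_append_drop j s, hdropeq, hdrop2]
      rw [specF_append _ htake]
      rw [specF_bs]
      simp

-- ===== VERDICT (by name: the statement is the Claim_ definition above) =====
theorem makePs1_spec : Claim_equal_makePs1 := by
  intro s _
  unfold Spec_makePs1 makePs1 makePs1_alt
  apply String.ext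
  rw [go_eq s.toList 0 "", alt_go_eq s.toList []]
  rfl
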